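-- pv_equiv track=rewrite | github.com/S-bite/ac-committer | submissions/abc068/arc079_b/AC_6155135.py | f
-- ===== SOURCE A (Python) =====
-- def f(l):
--     mx=max(l)
--     flg=True
--     for i in range(len(l)):
--         if (mx==l[i] and flg==True):
--             flg=False
--             l[i]-=50
--             l[i]=max(0,l[i])
--         else:
--             l[i]+=1
--     return l
-- ===== SOURCE B (Python) =====
-- def f(l):
--     # Online single pass with retroactive repair: maintain the running strict
--     # champion; when a new strict max appears, restore the previously fixed
--     # slot to value+1 and fix the new champion's slot. No max()/.index()/flag.
--     out = []
--     mi = -1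
--     mv = None
--     for x in l:
--         if mi < 0 or x > mv:
--             if mi >= 0:
--                 out[mi] = mv + 1
--             mi = len(out)
--             mv = x
--             out.append(max(0, x - 50))
--         else:
--             out.append(x + 1)
--     l[:] = out
--     return l
-- ===== Notes on version B (the rewrite author's own statement) =====
-- stated objective: alternative
-- what changed: Replaces A's precomputed max plus flagged conditional pass with a single online pass that maintains a running champion and retroactively repairs the previously fixed slot whenever a new strict maximum appears, so no max(), no index search and no flag are used.
-- outside the precondition, e.g. on f([]): A raises ValueError, B returns []
import Mathlib
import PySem

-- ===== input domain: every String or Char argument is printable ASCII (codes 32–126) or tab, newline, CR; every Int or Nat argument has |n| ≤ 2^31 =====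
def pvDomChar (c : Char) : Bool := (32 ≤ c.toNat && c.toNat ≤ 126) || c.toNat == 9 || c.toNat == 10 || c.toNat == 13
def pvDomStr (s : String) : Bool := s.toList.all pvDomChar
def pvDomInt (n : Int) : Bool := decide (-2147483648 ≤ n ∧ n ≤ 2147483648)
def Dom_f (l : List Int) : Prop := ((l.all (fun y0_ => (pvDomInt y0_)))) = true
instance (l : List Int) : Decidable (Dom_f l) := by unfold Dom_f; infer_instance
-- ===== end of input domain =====

-- B replaces A's precomputed-max flagged pass by one online pass with a running
-- champion and retroactive repair; both mutate l in place in Python (return value proved here).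

-- ===== PORT A =====
-- A's for-loop reads and writes only l[i] at step i, so it is the structural
-- recursion below carrying the flag.
def fLoopA (mx : Int) (flg : Bool) : List Int → List Int
  | [] => []
  | v :: rest =>
    if mx == v && flg == true then
      (max 0 (v - 50)) :: fLoopA mx false rest
    else
      (v + 1) :: fLoopA mx flg rest

def f (l : List Int) : List Int :=
  match PySem.List.max? l (fun y => y) with
  | none => []          -- unreachable: Python raises ValueError on max([]), excluded by Pre_f
  | some mx => fLoopA mx true l

-- ===== PORT B =====
-- State: (out, champ); champ = some (mi, mv) once set (Python's mi = -1 / mv = None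
-- initial state is champ = none; mv is never read while None, so this is exact).
def fStepB : List Int × Option (Nat × Int) → Int → List Int × Option (Nat × Int)
  | (out, none), x => (out ++ [max 0 (x - 50)], some (out.length, x))
  | (out, some (mi, mv)), x =>
    if x > mv then
      ((out.set mi (mv + 1)) ++ [max 0 (x - 50)], some (out.length, x))
    else
      (out ++ [x + 1], some (mi, mv))

def f_alt (l : List Int) : List Int :=
  (l.foldl fStepB ([], none)).1

-- ===== PRECONDITION & SPEC =====
-- A raises ValueError on max([]) for the empty list; Pre_f excludes exactly that input.
def Pre_f (l : List Int) : Prop := l ≠ []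
instance (l : List Int) : Decidable (Pre_f l) := by unfold Pre_f; infer_instance
def pvWitness_f : List Int := [3, 1, 3]

def Spec_f (l : List Int) (out : List Int) : Prop := out = f_alt l
instance (l : List Int) (out : List Int) : Decidable (Spec_f l out) := by unfold Spec_f; infer_instance

-- ===== CLAIM =====
def Claim_equal_f : Prop := ∀ (l : List Int), Dom_f l → Pre_f l → Spec_f l (f l)

-- ===== LEMMAS AND PROOFS =====
theorem fLoopA_false (mx : Int) (l : List Int) :
    fLoopA mx false l = l.map (fun x => x + 1) := by
  induction l with
  | nil => rfl
  | cons v rest ih => simp [fLoopA, ih]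

theorem fLoopA_true (mx : Int) (l : List Int) (idx : Nat)
    (h : PySem.List.index? l mx = some idx) :
    fLoopA mx true l = (l.map (fun x => x + 1)).set idx (max 0 (mx - 50)) := by
  induction l generalizing idx with
  | nil => simp [PySem.List.index?] at h
  | cons v rest ih =>
    by_cases hv : v = mx
    · subst hv
      rw [PySem.List.index?_cons_self] at h
      cases h
      simp [fLoopA, fLoopA_false]
    · rw [PySem.List.index?_cons_of_ne rest hv] at h
      cases hrest : PySem.List.index? rest mx with
      | none => rw [hrest] at h; simp at h
      | some j =>
        rw [hrest] at h
        simp at h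
        subst h
        have hne : (mx == v) = false := by simp [Ne.symm hv]
        simp [fLoopA, hne, ih j hrest]

theorem max?_id_of (p : List Int) (mv : Int) (hmem : mv ∈ p)
    (hmax : ∀ y ∈ p, y ≤ mv) : PySem.List.max? p (fun y => y) = some mv := by
  cases h : PySem.List.max? p (fun y => y) with
  | none =>
    have := (PySem.List.max?_eq_none_iff p (fun y => y)).mp h
    subst this; simp at hmem
  | some m =>
    have hm : m ∈ p := PySem.List.max?_mem h
    have h1 : m ≤ mv := hmax m hm
    have h2 : mv ≤ m := PySem.List.max?_isMax h mv hmem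
    exact congrArg some (le_antisymm h1 h2)

-- closed form of port A on a nonempty list, via its first maximum
theorem f_closed (l : List Int) (mv : Int) (mi : Nat)
    (hmem : mv ∈ l) (hmax : ∀ y ∈ l, y ≤ mv)
    (hidx : PySem.List.index? l mv = some mi) :
    f l = (l.map (fun x => x + 1)).set mi (max 0 (mv - 50)) := by
  unfold f
  rw [max?_id_of l mv hmem hmax]
  exact fLoopA_true mv l mi hidx

theorem getElem_map_add_one (p : List Int) (mi : Nat) (mv : Int)
    (hidx : PySem.List.index? p mv = some mi) :
    ∃ hk : mi < (p.map (fun x => x + 1)).length,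
      (p.map (fun x => x + 1))[mi] = mv + 1 := by
  obtain ⟨hk, hget, -⟩ := PySem.List.getElem_of_index?_eq_some hidx
  refine ⟨by simpa using hk, ?_⟩
  simp [hget]

-- B's loop invariant: after processing prefix p (champion (mi, mv)), the fold of the
-- rest from that state equals A applied to the whole list.
theorem B_inv (rest : List Int) : ∀ (p : List Int) (mi : Nat) (mv : Int),
    mv ∈ p → (∀ y ∈ p, y ≤ mv) → PySem.List.index? p mv = some mi →
    (rest.foldl fStepB ((p.map (fun x => x + 1)).set mi (max 0 (mv - 50)), some (mi, mv))).1
      = f (p ++ rest) := by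
  induction rest with
  | nil =>
    intro p mi mv hmem hmax hidx
    simp [List.foldl]
    exact (f_closed p mv mi hmem hmax hidx).symm
  | cons x rest ih =>
    intro p mi mv hmem hmax hidx
    simp only [List.foldl, fStepB]
    by_cases hx : x > mv
    · simp only [if_pos hx]
      -- restoring out[mi] to mv+1 undoes the fix: out.set mi (mv+1) = p.map (+1)
      obtain ⟨hk, hget⟩ := getElem_map_add_one p mi mv hidx
      have hrestore :
          ((p.map (fun x => x + 1)).set mi (max 0 (mv - 50))).set mi (mv + 1)
            = p.map (fun x => x + 1) := by
        rw [List.set_set, ← hget]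
        exact List.set_getElem_self hk
      rw [hrestore]
      have hlen : ((p.map (fun x => x + 1)).set mi (max 0 (mv - 50))).length = p.length := by
        simp
      rw [hlen]
      have hnotmem : x ∉ p := fun hxp => absurd (hmax x hxp) (by omega)
      have happ : p.map (fun y => y + 1) ++ [max 0 (x - 50)]
          = ((p ++ [x]).map (fun y => y + 1)).set p.length (max 0 (x - 50)) := by
        simp
      rw [happ]
      have := ih (p ++ [x]) p.length x (by simp) ?_ ?_
      · simpa using this
      · intro y hy
        rcases List.mem_append.mp hy with h | h
        · have := hmax y h; omega
        · simp at h; omega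
      · exact PySem.List.index?_append_singleton_self p x hnotmem
    · simp only [if_neg hx]
      obtain ⟨hk, -, -⟩ := PySem.List.getElem_of_index?_eq_some hidx
      have hmi : mi < p.length := by simpa using hk
      have happ : (p.map (fun y => y + 1)).set mi (max 0 (mv - 50)) ++ [x + 1]
          = ((p ++ [x]).map (fun y => y + 1)).set mi (max 0 (mv - 50)) := by
        rw [List.map_append, List.set_append]
        simp [hmi]
      rw [happ]
      have := ih (p ++ [x]) mi mv (List.mem_append.mpr (Or.inl hmem)) ?_ ?_
      · simpa using this
      · intro y hy
        rcases List.mem_append.mp hy with h | h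
        · exact hmax y h
        · simp at h; omega
      · exact (PySem.List.index?_append_of_mem [x] hmem).trans hidx

-- ===== VERDICT =====
theorem f_spec : Claim_equal_f := by
  intro l _ hpre
  unfold Spec_f f_alt
  cases l with
  | nil => exact absurd rfl hpre
  | cons x t =>
    have hstep : fStepB ([], none) x = ([max 0 (x - 50)], some (0, x)) := rfl
    have h0 : ([max 0 (x - 50)] : List Int)
        = ([x].map (fun y => y + 1)).set 0 (max 0 (x - 50)) := by simp
    have := B_inv t [x] 0 x (by simp) (by simp) (PySem.List.index?_cons_self x [])
    simp only [List.foldl, hstep]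
    rw [h0] at *
    simpa using this.symm
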